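-- pv_equiv track=rewrite | github.com/sbFranj/Python | Boletin_9_Programacion_modular_2/Ejercicio6.py | getNumberOfDigitsDecimal
-- ===== SOURCE A (Python) =====
-- def getNumberOfDigitsDecimal(number):
--     count=0
--     listdot=" "
--     listothers=""
--     for i in range(len(number)):
--         if(number[i]=="."):
--             listdot+=number[i]
--
--         if not(number[i]=="0" or number[i]=="1" or number[i]=="2" or number[i]=="3" or number[i]=="4" or number[i]=="5" or number[i]=="6" or number[i]=="7" or number[i]=="8" or number[i]=="9" or number[i]=="." or number[i]=="-"):
--             listothers+=number[i]
--
--         if(len(listothers)>0)or("-"in number[1:-1])or("-"in number[-1])or("." in (number[0] or number[-1]))or(".." in number)or(".." in listdot):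
--             count=None
--         elif ("0" in number[i]) or ("1"in number[i]) or ("2"in number[i]) or ("3"in number[i]) or ("4"in number[i]) or ("5"in number[i]) or ("6"in number[i]) or ("7"in number[i]) or ("8"in number[i]) or("9"in number[i]):
--             count+=1
--
--     return count
-- ===== SOURCE B (Python) =====
-- def getNumberOfDigitsDecimal(number):
--     if not all(c in "0123456789.-" for c in number):
--         return None
--     if "-" in number[1:-1] or number[-1:] == "-":
--         return None
--     if number[:1] == ".":
--         return None
--     if number.count(".") >= 2:
--         return None
--     return sum(c.isdigit() for c in number)
-- ===== Notes on version B (the rewrite author's own statement) =====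
-- stated objective: simpler
-- what changed: A's single index loop that re-evaluates the whole validity condition (re-slicing number[1:-1] and re-scanning the string) after every character, with a monotone None flag and accumulated listdot/listothers strings, is replaced by four short whole-string validation guards (charset, misplaced '-', leading '.', two dots) followed by one digit count.
import Mathlib
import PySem

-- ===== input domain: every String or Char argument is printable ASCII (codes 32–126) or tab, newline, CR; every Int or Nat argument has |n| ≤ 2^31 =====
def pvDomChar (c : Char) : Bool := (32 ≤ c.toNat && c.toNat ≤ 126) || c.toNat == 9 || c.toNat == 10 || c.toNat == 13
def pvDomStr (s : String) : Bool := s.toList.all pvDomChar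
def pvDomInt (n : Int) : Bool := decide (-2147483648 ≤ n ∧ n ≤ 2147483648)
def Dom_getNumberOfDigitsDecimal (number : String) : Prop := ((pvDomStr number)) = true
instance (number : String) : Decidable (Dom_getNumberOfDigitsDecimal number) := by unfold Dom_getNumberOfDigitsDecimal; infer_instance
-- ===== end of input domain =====

-- B replaces A's single monotone-flag index loop (validity re-checked after every character) by
-- whole-string validation guards followed by one digit count: simpler decomposition, same values.

-- ===== PORT A =====
-- A's 12-way equality chain 'number[i]=="0" or … or number[i]=="-"'
def pvAllowedCharA (c : Char) : Bool :=
  c == '0' || c == '1' || c == '2' || c == '3' || c == '4' || c == '5' || c == '6'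
    || c == '7' || c == '8' || c == '9' || c == '.' || c == '-'

-- A's elif chain '"0" in number[i] or … or "9" in number[i]' ('"d" in s' on the 1-char string number[i])
def pvDigitTestA (c : Char) : Bool :=
  PySem.Chars.isIn ['0'] [c] || PySem.Chars.isIn ['1'] [c] || PySem.Chars.isIn ['2'] [c]
    || PySem.Chars.isIn ['3'] [c] || PySem.Chars.isIn ['4'] [c] || PySem.Chars.isIn ['5'] [c]
    || PySem.Chars.isIn ['6'] [c] || PySem.Chars.isIn ['7'] [c] || PySem.Chars.isIn ['8'] [c]
    || PySem.Chars.isIn ['9'] [c]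

-- one iteration of A's loop body; state = (count, listdot, listothers); c = number[i]
-- number[-1] and number[0] are read with pyGetD: the loop body only runs when the string is
-- nonempty, so both indices are in range; '"." in (number[0] or number[-1])' reads number[0]
-- because the 1-char string number[0] is truthy.
def pvCharStepA (cs : List Char) (st : Option Int × List Char × List Char) (c : Char) :
    Option Int × List Char × List Char :=
  let count := st.1
  let listdot := if c == '.' then st.2.1 ++ [c] else st.2.1
  let listothers := if !(pvAllowedCharA c) then st.2.2 ++ [c] else st.2.2
  if 0 < listothers.length
      || PySem.Chars.isIn ['-'] (PySem.List.slice cs (some 1) (some (-1)))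
      || PySem.Chars.isIn ['-'] [PySem.List.pyGetD cs (-1) ' ']
      || PySem.Chars.isIn ['.'] [PySem.List.pyGetD cs 0 ' ']
      || PySem.Chars.isIn ['.', '.'] cs
      || PySem.Chars.isIn ['.', '.'] listdot then
    (none, listdot, listothers)
  else if pvDigitTestA c then
    -- count += 1: count is always 'some' on this branch (the invalid condition is monotone,
    -- so Python's None+1 TypeError is unreachable); Option.map (+1) transcribes it.
    (count.map (· + 1), listdot, listothers)
  else
    (count, listdot, listothers)

def getNumberOfDigitsDecimal (number : String) : Option Int :=
  let cs := number.toList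
  ((PySem.List.pyRange 0 (cs.length : Int) 1).foldl
      (fun st i => pvCharStepA cs st (PySem.List.pyGetD cs i ' '))
      ((some 0 : Option Int), ([' '] : List Char), ([] : List Char))).1

-- ===== PORT B =====
def getNumberOfDigitsDecimal_alt (number : String) : Option Int :=
  let cs := number.toList
  if !(cs.all fun c => PySem.Chars.isIn [c] ("0123456789.-".toList)) then
    none
  else if PySem.Chars.isIn ['-'] (PySem.List.slice cs (some 1) (some (-1)))
      || PySem.List.slice cs (some (-1)) none == ['-'] then
    none
  else if PySem.List.slice cs none (some 1) == ['.'] then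
    none
  else if 2 ≤ PySem.List.count cs '.' then
    none
  else
    some ((cs.map fun c => if PySem.Chars.isdigit c then (1 : Int) else 0).sum)

-- ===== PRECONDITION & SPEC =====
def Spec_getNumberOfDigitsDecimal (number : String) (out : Option Int) : Prop := out = getNumberOfDigitsDecimal_alt number
instance (number : String) (out : Option Int) : Decidable (Spec_getNumberOfDigitsDecimal number out) := by unfold Spec_getNumberOfDigitsDecimal; infer_instance

-- ===== CLAIM (what is proved, stated in full; the proofs are below) =====
def Claim_equal_getNumberOfDigitsDecimal : Prop := ∀ (number : String), Dom_getNumberOfDigitsDecimal number → Spec_getNumberOfDigitsDecimal number (getNumberOfDigitsDecimal number)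

-- ===== LEMMAS AND PROOFS =====

-- the parts of A's invalid condition that depend only on the whole string
def pvG (cs : List Char) : Bool :=
  PySem.Chars.isIn ['-'] (PySem.List.slice cs (some 1) (some (-1)))
    || PySem.Chars.isIn ['-'] [PySem.List.pyGetD cs (-1) ' ']
    || PySem.Chars.isIn ['.'] [PySem.List.pyGetD cs 0 ' ']
    || PySem.Chars.isIn ['.', '.'] cs

def pvBads (p : List Char) : List Char := p.filter (fun c => !(pvAllowedCharA c))

def pvCond (cs p : List Char) : Bool :=
  !(pvBads p).isEmpty || pvG cs || decide (2 ≤ p.count '.')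

def pvRes (cs p : List Char) : Option Int :=
  if p ≠ [] ∧ pvCond cs p = true then none
  else some (p.countP pvDigitTestA : Int)

lemma isIn_single_iff (a : Char) (l : List Char) : PySem.Chars.isIn [a] l = true ↔ a ∈ l := by
  rw [PySem.Chars.isIn_iff_infix]
  constructor
  · intro h; exact h.subset (by simp)
  · intro h
    obtain ⟨s, t, rfl⟩ := List.append_of_mem h
    exact ⟨s, t, by simp⟩

lemma isIn_single_single (a b : Char) : PySem.Chars.isIn [a] [b] = (b == a) := by
  rw [Bool.eq_iff_iff, isIn_single_iff]
  constructor
  · intro h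
    have ha : a = b := by simpa using h
    simp [ha]
  · intro h
    have hb : b = a := by simpa using h
    simp [hb]

lemma dd_count (l : List Char) (h : PySem.Chars.isIn ['.', '.'] l = true) : 2 ≤ l.count '.' := by
  rw [PySem.Chars.isIn_iff_infix] at h
  have := h.sublist.count_le '.'
  simpa using this

lemma dd_listdot (q : List Char) :
    PySem.Chars.isIn ['.', '.'] (' ' :: q.filter (fun x => x == '.')) = decide (2 ≤ q.count '.') := by
  rw [List.filter_beq]
  rcases Nat.lt_or_ge (q.count '.') 2 with h | h
  · have hno : ¬ (PySem.Chars.isIn ['.', '.'] (' ' :: List.replicate (q.count '.') '.') = true) := by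
      intro hdd
      have := dd_count _ hdd
      simp at this
      omega
    simp only [Bool.not_eq_true] at hno
    rw [hno]
    simp
    omega
  · have hsplit : (' ' :: List.replicate (q.count '.') '.')
        = [' '] ++ ['.', '.'] ++ List.replicate (q.count '.' - 2) '.' := by
      have h2 : q.count '.' = 2 + (q.count '.' - 2) := by omega
      rw [h2]
      simp [List.replicate_add, List.replicate_succ]
    rw [hsplit]
    simp only [h, decide_true]
    rw [PySem.Chars.isIn_iff_infix]
    exact ⟨[' '], List.replicate (q.count '.' - 2) '.', rfl⟩

lemma bads_append_ne (p : List Char) (c : Char) (h : pvBads p ≠ []) : pvBads (p ++ [c]) ≠ [] := by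
  simp only [pvBads, List.filter_append, ne_eq, List.append_eq_nil_iff, not_and] at *
  intro hnil
  exact absurd hnil h

lemma cond_mono (cs p : List Char) (c : Char) (h : pvCond cs p = true) :
    pvCond cs (p ++ [c]) = true := by
  simp only [pvCond, Bool.or_eq_true, Bool.not_eq_true', List.isEmpty_eq_false_iff,
    decide_eq_true_eq] at h ⊢
  rcases h with (h | h) | h
  · exact Or.inl (Or.inl (bads_append_ne p c h))
  · exact Or.inl (Or.inr h)
  · refine Or.inr ?_
    rw [List.count_append]
    omega

lemma length_pos_eq_not_isEmpty {α : Type} (l : List α) :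
    (decide (0 < l.length)) = !l.isEmpty := by
  rw [Bool.eq_iff_iff]
  simp [List.length_pos_iff]

lemma pvStep_state (cs p : List Char) (c : Char) :
    pvCharStepA cs (pvRes cs p, ' ' :: p.filter (fun x => x == '.'), pvBads p) c
      = (pvRes cs (p ++ [c]), ' ' :: (p ++ [c]).filter (fun x => x == '.'), pvBads (p ++ [c])) := by
  have hld : (' ' :: (p ++ [c]).filter (fun x => x == '.'))
      = (if c == '.' then (' ' :: p.filter (fun x => x == '.')) ++ [c]
         else ' ' :: p.filter (fun x => x == '.')) := by
    by_cases h : c = '.' <;> simp [List.filter_append, h]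
  have hlo : pvBads (p ++ [c])
      = (if !(pvAllowedCharA c) then pvBads p ++ [c] else pvBads p) := by
    by_cases h : pvAllowedCharA c <;> simp [pvBads, List.filter_append, h]
  have hcond : (decide (0 < (pvBads (p ++ [c])).length)
      || PySem.Chars.isIn ['-'] (PySem.List.slice cs (some 1) (some (-1)))
      || PySem.Chars.isIn ['-'] [PySem.List.pyGetD cs (-1) ' ']
      || PySem.Chars.isIn ['.'] [PySem.List.pyGetD cs 0 ' ']
      || PySem.Chars.isIn ['.', '.'] cs
      || PySem.Chars.isIn ['.', '.'] (' ' :: (p ++ [c]).filter (fun x => x == '.')))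
      = pvCond cs (p ++ [c]) := by
    rw [dd_listdot, length_pos_eq_not_isEmpty]
    simp only [pvCond, pvG, Bool.or_assoc]
  rw [pvCharStepA]
  simp only [← hld, ← hlo, hcond]
  by_cases hc : pvCond cs (p ++ [c]) = true
  · simp [hc, pvRes]
  · have hnotp : ¬ (p ≠ [] ∧ pvCond cs p = true) := by
      rintro ⟨-, hp⟩
      exact hc (cond_mono cs p c hp)
    have hres : pvRes cs p = some (p.countP pvDigitTestA : Int) := by
      simp only [pvRes]
      rw [if_neg hnotp]
    have hres2 : pvRes cs (p ++ [c]) = some ((p ++ [c]).countP pvDigitTestA : Int) := by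
      simp only [pvRes]
      rw [if_neg (by rintro ⟨-, hcc⟩; exact hc hcc)]
    rw [if_neg hc]
    by_cases hd : pvDigitTestA c = true
    · rw [if_pos hd, hres, hres2]
      simp [List.countP_append, hd]
    · rw [if_neg hd, hres, hres2]
      simp [List.countP_append, hd]

lemma pvFoldA (cs : List Char) (rest : List Char) : ∀ (p : List Char),
    List.foldl (pvCharStepA cs)
      (pvRes cs p, ' ' :: p.filter (fun x => x == '.'), pvBads p) rest
      = (pvRes cs (p ++ rest), ' ' :: (p ++ rest).filter (fun x => x == '.'), pvBads (p ++ rest)) := by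
  induction rest with
  | nil => intro p; simp
  | cons c rest ih =>
    intro p
    rw [List.foldl_cons, pvStep_state, ih (p ++ [c])]
    simp

lemma A_eq (number : String) :
    getNumberOfDigitsDecimal number = pvRes number.toList number.toList := by
  have hdef : getNumberOfDigitsDecimal number
      = ((PySem.List.pyRange 0 (number.toList.length : Int) 1).foldl
          (fun st i => pvCharStepA number.toList st (PySem.List.pyGetD number.toList i ' '))
          ((some 0 : Option Int), ([' '] : List Char), ([] : List Char))).1 := rfl
  rw [hdef, PySem.List.foldl_pyRange_zero_pyGetD' number.toList ' ' (pvCharStepA number.toList)]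
  have h0 : ((some 0 : Option Int), ([' '] : List Char), ([] : List Char))
      = (pvRes number.toList [], ' ' :: ([] : List Char).filter (fun x => x == '.'),
         pvBads ([] : List Char)) := by
    simp [pvRes, pvBads]
  rw [h0, pvFoldA number.toList number.toList []]
  simp

lemma digitTest_eq_isdigit : pvDigitTestA = PySem.Chars.isdigit := by
  funext c
  simp only [pvDigitTestA, isIn_single_single, PySem.Chars.isdigit]
  rw [Bool.eq_iff_iff]
  simp only [Bool.or_eq_true, beq_iff_eq, Bool.and_eq_true, decide_eq_true_eq]
  constructor
  · rintro (((((((((rfl | rfl) | rfl) | rfl) | rfl) | rfl) | rfl) | rfl) | rfl) | rfl) <;>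
      exact ⟨by decide, by decide⟩
  · rintro ⟨h1, h2⟩
    rw [Char.le_def] at h1 h2
    have hv1 : 48 ≤ c.val.toNat := h1
    have hv2 : c.val.toNat ≤ 57 := h2
    have hval : ∀ (d : Char), c.val.toNat = d.val.toNat → c = d := by
      intro d hd
      apply Char.ext
      exact UInt32.toNat_inj.mp hd
    interval_cases h : c.val.toNat
    · have := hval '0' (by decide); tauto
    · have := hval '1' (by decide); tauto
    · have := hval '2' (by decide); tauto
    · have := hval '3' (by decide); tauto
    · have := hval '4' (by decide); tauto
    · have := hval '5' (by decide); tauto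
    · have := hval '6' (by decide); tauto
    · have := hval '7' (by decide); tauto
    · have := hval '8' (by decide); tauto
    · have := hval '9' (by decide); tauto

lemma allowed_iff (c : Char) :
    PySem.Chars.isIn [c] ("0123456789.-".toList) = pvAllowedCharA c := by
  have hlist : "0123456789.-".toList
      = ['0', '1', '2', '3', '4', '5', '6', '7', '8', '9', '.', '-'] := rfl
  rw [Bool.eq_iff_iff, isIn_single_iff, hlist]
  simp only [List.mem_cons, List.not_mem_nil, or_false, pvAllowedCharA, Bool.or_eq_true,
    beq_iff_eq]
  tauto

lemma drop_length_sub_one {α : Type} (l : List α) (h : l ≠ []) :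
    l.drop (l.length - 1) = [l.getLast h] := by
  induction l with
  | nil => simp at h
  | cons a t ih =>
    cases t with
    | nil => simp
    | cons b u =>
      have ht : (b :: u : List α) ≠ [] := by simp
      have hlen : (a :: b :: u : List α).length - 1 = ((b :: u).length - 1) + 1 := by
        simp
      rw [hlen, List.drop_succ_cons, ih ht]
      simp [List.getLast_cons]

lemma all_eq_isEmpty_bads (q : List Char) :
    (q.all fun c => PySem.Chars.isIn [c] ("0123456789.-".toList)) = (pvBads q).isEmpty := by
  rw [Bool.eq_iff_iff]
  simp only [List.all_eq_true, allowed_iff, pvBads, List.isEmpty_iff, List.filter_eq_nil_iff,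
    Bool.not_eq_true]
  constructor
  · intro h c hc
    simp [h c hc]
  · intro h c hc
    have := h c hc
    simpa using this

-- ===== VERDICT (by name: the statement is the Claim_ definition above) =====
theorem getNumberOfDigitsDecimal_spec : Claim_equal_getNumberOfDigitsDecimal := by
  intro number _
  show getNumberOfDigitsDecimal number = getNumberOfDigitsDecimal_alt number
  rw [A_eq]
  unfold getNumberOfDigitsDecimal_alt
  cases hcs : number.toList with
  | nil =>
    simp [pvRes, PySem.List.count, PySem.List.slice]
    decide
  | cons a t =>
    have hne : (a :: t : List Char) ≠ [] := by simp
    have hlast : PySem.List.pyGetD (a :: t) (-1) ' ' = (a :: t).getLast hne :=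
      PySem.List.pyGetD_neg_one (a :: t) ' ' hne
    have hsliceLast : PySem.List.slice (a :: t) (some (-1)) none = [(a :: t).getLast hne] := by
      rw [PySem.List.slice_from_neg_one, drop_length_sub_one (a :: t) hne]
    have hfirst : PySem.List.pyGetD (a :: t) 0 ' ' = a := PySem.List.pyGetD_zero_cons a t ' '
    have hsliceFirst : PySem.List.slice (a :: t) none (some 1) = [a] := by
      rw [PySem.List.slice_to (a :: t) (b := 1) (by norm_num)]
      norm_num
    have hbeqLast : (([(a :: t).getLast hne] : List Char) == ['-']) = ((a :: t).getLast hne == '-') := by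
      rw [Bool.eq_iff_iff]
      simp
    have hbeqFirst : (([a] : List Char) == ['.']) = (a == '.') := by
      rw [Bool.eq_iff_iff]
      simp
    have hsum : ((a :: t).map fun c => if PySem.Chars.isdigit c then (1 : Int) else 0).sum
        = ((a :: t).countP pvDigitTestA : Int) := by
      rw [PySem.List.sum_map_ite_one_zero PySem.Chars.isdigit (a :: t), digitTest_eq_isdigit]
    simp only [pvRes, pvCond, pvG, all_eq_isEmpty_bads, hlast, hsliceLast, hfirst, hsliceFirst,
      hbeqLast, hbeqFirst, hsum, isIn_single_single, PySem.List.count]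
    by_cases hb : (pvBads (a :: t)).isEmpty
    · by_cases hm : PySem.Chars.isIn ['-'] (PySem.List.slice (a :: t) (some 1) (some (-1))) = true
      · simp [hb, hm, hne]
      · by_cases hg2 : ((a :: t).getLast hne == '-') = true
        · simp [hb, hm, hg2, hne]
        · by_cases hg3 : (a == '.') = true
          · simp [hb, hm, hg2, hg3, hne]
          · by_cases hcnt : 2 ≤ List.count '.' (a :: t)
            · simp [hb, hm, hg2, hg3, hne, hcnt]
            · have hdd : PySem.Chars.isIn ['.', '.'] (a :: t) = false := by
                cases hx : PySem.Chars.isIn ['.', '.'] (a :: t) with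
                | false => rfl
                | true => exact absurd (dd_count _ hx) hcnt
              simp [hb, hm, hg2, hg3, hne, hcnt, hdd]
    · simp [hb, hne]
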